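-- pv_equiv track=rewrite | github.com/thyyt/aoc_2019 | 3/solution.py | compute_wire_dimensions
-- ===== SOURCE A (Python) =====
-- LETTERS = {"height": {"U", "D"}, "width": {"L", "R"}}
--
-- NEGATIVE_DIRECTIONS = {"height": "D", "width": "L"}
--
-- def compute_wire_dimensions(wire_instructions, dimension="height"):
--     position = 0
--     positions = [position]
--     dimension_instructions = [
--         instruction
--         for instruction in wire_instructions
--         if instruction[0] in LETTERS[dimension]
--     ]
--     for instruction in dimension_instructions:
--         if instruction[0] == NEGATIVE_DIRECTIONS[dimension]:
--             position -= int(instruction[1:])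
--         else:
--             position += int(instruction[1:])
--         positions.append(position)
--
--     return min(positions), max(positions)
-- ===== SOURCE B (Python) =====
-- LETTERS = {"height": {"U", "D"}, "width": {"L", "R"}}
--
-- NEGATIVE_DIRECTIONS = {"height": "D", "width": "L"}
--
-- def compute_wire_dimensions(wire_instructions, dimension="height"):
--     deltas = [
--         -int(i[1:]) if i[0] == NEGATIVE_DIRECTIONS[dimension] else int(i[1:])
--         for i in wire_instructions
--         if i[0] in LETTERS[dimension]
--     ]
--
--     def scan(lo, hi):
--         # (min prefix sum, max prefix sum, total) of deltas[lo:hi], empty prefix included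
--         if lo == hi:
--             return 0, 0, 0
--         if hi - lo == 1:
--             d = deltas[lo]
--             return min(0, d), max(0, d), d
--         mid = (lo + hi) // 2
--         lmin, lmax, lsum = scan(lo, mid)
--         rmin, rmax, rsum = scan(mid, hi)
--         return min(lmin, lsum + rmin), max(lmax, lsum + rmax), lsum + rsum
--
--     mn, mx, _ = scan(0, len(deltas))
--     return mn, mx
-- ===== Notes on version B (the rewrite author's own statement) =====
-- stated objective: alternative
-- what changed: B reduces the input to signed deltas and computes the min/max cumulative position by divide-and-conquer, recursively combining (min-prefix, max-prefix, total) summaries of the two halves, instead of A's linear pass that appends every cumulative position to a list and scans it twice with min() and max().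
import Mathlib
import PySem

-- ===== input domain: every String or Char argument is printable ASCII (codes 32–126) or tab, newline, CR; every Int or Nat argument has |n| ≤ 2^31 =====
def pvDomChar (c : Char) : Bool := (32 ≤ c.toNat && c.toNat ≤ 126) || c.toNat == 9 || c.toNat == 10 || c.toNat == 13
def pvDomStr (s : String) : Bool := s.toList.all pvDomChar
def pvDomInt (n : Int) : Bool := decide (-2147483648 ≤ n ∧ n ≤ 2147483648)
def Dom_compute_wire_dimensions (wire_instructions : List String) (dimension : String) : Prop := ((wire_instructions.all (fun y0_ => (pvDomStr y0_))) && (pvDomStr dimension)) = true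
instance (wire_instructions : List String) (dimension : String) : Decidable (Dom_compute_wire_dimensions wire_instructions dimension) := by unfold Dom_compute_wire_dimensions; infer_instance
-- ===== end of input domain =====

-- B replaces A's positions-list + two min/max scans with a divide-and-conquer combine of (min-prefix, max-prefix, total) summaries; return values proved equal on Pre_.


-- shared module-level constants (the Python module's LETTERS / NEGATIVE_DIRECTIONS dicts)
-- LETTERS[d]; [] stands for the KeyError case, excluded by Pre_ whenever it is reached
def pvLetters (d : String) : List Char :=
  if d == "height" then ['U', 'D'] else if d == "width" then ['L', 'R'] else []

-- NEGATIVE_DIRECTIONS[d]; the ' ' default stands for the KeyError case, excluded by Pre_ whenever it is reached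
def pvNegDir (d : String) : Char :=
  if d == "height" then 'D' else if d == "width" then 'L' else ' '

-- instruction[0]; the ' ' default stands for the IndexError on an empty string, excluded by Pre_
def pvHead (s : String) : Char := (PySem.Str.pyGet? s 0).getD ' '

-- int(instruction[1:]); the 0 default stands for the ValueError, excluded by Pre_
def pvIntOf (s : String) : Int := (PySem.Int.ofChars? s.toList.tail).getD 0

-- ===== PORT A =====
-- the for-loop over dimension_instructions, carrying (position, positions)
def pvLoopA (neg : Char) (l : List String) (position : Int) (positions : List Int) : List Int :=
  match l with
  | [] => positions
  | ins :: rest =>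
    let position' := if pvHead ins == neg then position - pvIntOf ins else position + pvIntOf ins
    pvLoopA neg rest position' (positions ++ [position'])

def compute_wire_dimensions (wire_instructions : List String) (dimension : String) : Int × Int :=
  let dimension_instructions :=
    wire_instructions.filter (fun ins => (pvLetters dimension).contains (pvHead ins))
  let positions := pvLoopA (pvNegDir dimension) dimension_instructions 0 [0]
  ((PySem.List.min? positions id).getD 0, (PySem.List.max? positions id).getD 0)

-- ===== PORT B =====
-- the signed-delta comprehension of Source B
def pvSignedDelta (neg : Char) (s : String) : Int :=
  if pvHead s == neg then -pvIntOf s else pvIntOf s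

def pvDeltas (wire_instructions : List String) (dimension : String) : List Int :=
  (wire_instructions.filter (fun i => (pvLetters dimension).contains (pvHead i))).map
    (pvSignedDelta (pvNegDir dimension))

-- Source B's scan(lo, hi): divide-and-conquer on the (sub)list of deltas, returning
-- (min prefix sum, max prefix sum, total); the index pair becomes the sublist itself
def pvScan (ds : List Int) : Int × Int × Int :=
  match h : ds with
  | [] => (0, 0, 0)
  | [d] => (min 0 d, max 0 d, d)
  | _ :: _ :: _ =>
    let mid := ds.length / 2
    let (lmin, lmax, lsum) := pvScan (ds.take mid)
    let (rmin, rmax, rsum) := pvScan (ds.drop mid)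
    (min lmin (lsum + rmin), max lmax (lsum + rmax), lsum + rsum)
termination_by ds.length
decreasing_by
  · simp_all [List.length_take]; omega
  · simp_all [List.length_drop]; omega

def compute_wire_dimensions_alt (wire_instructions : List String) (dimension : String) : Int × Int :=
  let r := pvScan (pvDeltas wire_instructions dimension)
  (r.1, r.2.1)

-- ===== PRECONDITION & SPEC =====
-- Pre_ excludes exactly the inputs where A raises: an empty instruction string → IndexError, a dimension
-- that is not a LETTERS key reached with a nonempty list → KeyError, an unparsable count on a kept
-- instruction → ValueError.
def Pre_compute_wire_dimensions (wire_instructions : List String) (dimension : String) : Prop :=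
  (wire_instructions = [] ∨ dimension = "height" ∨ dimension = "width") ∧
  ∀ ins ∈ wire_instructions, ins.toList ≠ [] ∧
    ((pvLetters dimension).contains (pvHead ins) = true →
      PySem.Int.ofChars? ins.toList.tail ≠ none)

instance (wire_instructions : List String) (dimension : String) : Decidable (Pre_compute_wire_dimensions wire_instructions dimension) := by unfold Pre_compute_wire_dimensions; infer_instance

def pvWitness_compute_wire_dimensions : List String × String := (["U10", "L3", "D4"], "height")

def Spec_compute_wire_dimensions (wire_instructions : List String) (dimension : String) (out : Int × Int) : Prop := out = compute_wire_dimensions_alt wire_instructions dimension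
instance (wire_instructions : List String) (dimension : String) (out : Int × Int) : Decidable (Spec_compute_wire_dimensions wire_instructions dimension out) := by unfold Spec_compute_wire_dimensions; infer_instance

-- ===== CLAIM (what is proved, stated in full; the proofs are below) =====
def Claim_equal_compute_wire_dimensions : Prop := ∀ (wire_instructions : List String) (dimension : String), Dom_compute_wire_dimensions wire_instructions dimension → Pre_compute_wire_dimensions wire_instructions dimension → Spec_compute_wire_dimensions wire_instructions dimension (compute_wire_dimensions wire_instructions dimension)

-- ===== LEMMAS AND PROOFS =====
def pvG : List Int → Int × Int × Int
  | [] => (0, 0, 0)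
  | d :: ds =>
    let (lo, hi, t) := pvG ds
    (min 0 (d + lo), max 0 (d + hi), d + t)

theorem pvG_cons (d : Int) (ds : List Int) :
    pvG (d :: ds) = (min 0 (d + (pvG ds).1), max 0 (d + (pvG ds).2.1), d + (pvG ds).2.2) := by
  rcases h : pvG ds with ⟨a, b, t⟩
  simp [pvG, h]

theorem pvG_bounds (ds : List Int) : (pvG ds).1 ≤ 0 ∧ 0 ≤ (pvG ds).2.1 := by
  induction ds with
  | nil => simp [pvG]
  | cons d ds ih => rw [pvG_cons]; simp only; omega

theorem pvG_append (xs ys : List Int) :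
    pvG (xs ++ ys) =
      (min (pvG xs).1 ((pvG xs).2.2 + (pvG ys).1),
       max (pvG xs).2.1 ((pvG xs).2.2 + (pvG ys).2.1),
       (pvG xs).2.2 + (pvG ys).2.2) := by
  induction xs with
  | nil =>
    rcases hy : pvG ys with ⟨a1, b1, t1⟩
    have h := pvG_bounds ys
    rw [hy] at h
    simp only [List.nil_append, hy]
    rw [show pvG [] = ((0:Int),(0:Int),(0:Int)) from rfl]
    simp only [Prod.mk.injEq] at h ⊢
    refine ⟨by omega, by omega, by ring⟩
  | cons x xs ih =>
    simp only [List.cons_append]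
    rw [pvG_cons, pvG_cons, ih]
    simp only [Prod.mk.injEq]
    refine ⟨by omega, by omega, by ring⟩

theorem pvScan_eq_pvG_aux : ∀ (n : Nat) (ds : List Int), ds.length ≤ n → pvScan ds = pvG ds := by
  intro n
  induction n with
  | zero =>
    intro ds h
    have : ds = [] := by cases ds <;> simp_all
    subst this; simp [pvScan, pvG]
  | succ n ih =>
    intro ds h
    match ds with
    | [] => simp [pvScan, pvG]
    | [d] => simp [pvScan, pvG]
    | d1 :: d2 :: tl =>
      have hlen : tl.length + 2 ≤ n + 1 := by simpa using h
      rw [pvScan.eq_def]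
      simp only
      have hl : ((d1 :: d2 :: tl).take ((d1 :: d2 :: tl).length / 2)).length ≤ n := by
        simp [List.length_take]; omega
      have hr : ((d1 :: d2 :: tl).drop ((d1 :: d2 :: tl).length / 2)).length ≤ n := by
        simp [List.length_drop]; omega
      rw [ih _ hl, ih _ hr]
      rcases hL : pvG ((d1 :: d2 :: tl).take ((d1 :: d2 :: tl).length / 2)) with ⟨a1, b1, t1⟩
      rcases hR : pvG ((d1 :: d2 :: tl).drop ((d1 :: d2 :: tl).length / 2)) with ⟨a2, b2, t2⟩
      have happ := pvG_append ((d1 :: d2 :: tl).take ((d1 :: d2 :: tl).length / 2))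
        ((d1 :: d2 :: tl).drop ((d1 :: d2 :: tl).length / 2))
      rw [List.take_append_drop, hL, hR] at happ
      rw [happ]

theorem pvScan_eq_pvG (ds : List Int) : pvScan ds = pvG ds :=
  pvScan_eq_pvG_aux ds.length ds le_rfl

theorem min?_append_singleton (acc : List Int) (m x : Int)
    (h : PySem.List.min? acc id = some m) :
    PySem.List.min? (acc ++ [x]) id = some (min m x) := by
  simp [PySem.List.min?, List.foldl_append] at *
  rw [h]
  simp only []
  split_ifs with h1 <;> simp only [Option.some.injEq] <;> omega

theorem max?_append_singleton (acc : List Int) (m x : Int)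
    (h : PySem.List.max? acc id = some m) :
    PySem.List.max? (acc ++ [x]) id = some (max m x) := by
  simp [PySem.List.max?, List.foldl_append] at *
  rw [h]
  simp only []
  split_ifs with h1 <;> simp only [Option.some.injEq] <;> omega

-- A's loop over the filtered list vs the suffix summary of its signed deltas
theorem loopA_eq (neg : Char) :
    ∀ (l : List String) (pos : Int) (acc : List Int) (mn mx : Int),
    PySem.List.min? acc id = some mn →
    PySem.List.max? acc id = some mx →
    mn ≤ pos → pos ≤ mx →
    ((PySem.List.min? (pvLoopA neg l pos acc) id).getD 0,
     (PySem.List.max? (pvLoopA neg l pos acc) id).getD 0)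
    = (min mn (pos + (pvG (l.map (pvSignedDelta neg))).1),
       max mx (pos + (pvG (l.map (pvSignedDelta neg))).2.1)) := by
  intro l
  induction l with
  | nil =>
    intro pos acc mn mx hmn hmx h1 h2
    simp [pvLoopA, pvG, hmn, hmx]
    omega
  | cons ins rest ih =>
    intro pos acc mn mx hmn hmx h1 h2
    have hbounds := pvG_bounds (rest.map (pvSignedDelta neg))
    have hpos : (if pvHead ins == neg then pos - pvIntOf ins else pos + pvIntOf ins)
        = pos + pvSignedDelta neg ins := by
      simp [pvSignedDelta]; split_ifs <;> ring
    simp only [pvLoopA, hpos, List.map_cons]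
    rw [pvG_cons]
    have := ih (pos + pvSignedDelta neg ins) (acc ++ [pos + pvSignedDelta neg ins])
      (min mn (pos + pvSignedDelta neg ins)) (max mx (pos + pvSignedDelta neg ins))
      (min?_append_singleton acc mn _ hmn) (max?_append_singleton acc mx _ hmx)
      (by omega) (by omega)
    rw [this]
    rcases hg : pvG (rest.map (pvSignedDelta neg)) with ⟨lo, hi, t⟩
    rw [hg] at hbounds
    simp only [Prod.mk.injEq] at hbounds ⊢
    constructor <;> omega

-- ===== VERDICT (by name: the statement is the Claim_ definition above) =====
theorem compute_wire_dimensions_spec : Claim_equal_compute_wire_dimensions := by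
  intro wire_instructions dimension _ _
  unfold Spec_compute_wire_dimensions compute_wire_dimensions compute_wire_dimensions_alt
  rw [pvScan_eq_pvG]
  have hb := pvG_bounds (pvDeltas wire_instructions dimension)
  have heq := loopA_eq (pvNegDir dimension)
    (wire_instructions.filter (fun ins => (pvLetters dimension).contains (pvHead ins)))
    0 [0] 0 0 rfl rfl le_rfl le_rfl
  simp only [pvDeltas] at hb ⊢
  rw [heq]
  rcases hg : pvG ((wire_instructions.filter
      (fun ins => (pvLetters dimension).contains (pvHead ins))).map
      (pvSignedDelta (pvNegDir dimension))) with ⟨lo, hi, t⟩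
  rw [hg] at hb
  simp only [Prod.mk.injEq] at hb ⊢
  constructor <;> omega
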